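-- pv_equiv track=rewrite | github.com/daun4168/code | Codeground/UniformNumber/uniform_number.py | un
-- ===== SOURCE A (Python) =====
-- import math
--
-- def un(N):
--     if N == 1:
--         return 2
--     elif N == 2:
--         return 3
--
--     root = int(math.sqrt(N))
--
--     for b in range(2, root+1):
--         if b == N - 1:
--             return b
--         n = N
--         k = n % b
--         while n > 0:
--             n = n // b
--             if n % b != k:
--                 break
--         if n == 0:
--             return b
--
--     # N = ab + a
--     for divisor in range(root, 1, -1):
--         if N % divisor == 0:
--             b = N // divisor - 1
--             if b > divisor:
--                 return b
--     return N - 1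
-- ===== SOURCE B (Python) =====
-- def _iroot(R, e):
--     lo, hi = 1, R
--     while lo < hi:
--         mid = (lo + hi + 1) // 2
--         if mid ** e <= R:
--             lo = mid
--         else:
--             hi = mid - 1
--     return lo
--
-- def un(N):
--     best = N + 1                          # base N + 1: N is a single digit there
--     k = 1                                 # the repeated digit; it must divide N
--     while k * k <= N:
--         if N % k == 0:
--             R = N // k                    # candidate repunit 1 + b + ... + b**(d-1)
--             if k < R - 1:
--                 best = min(best, R - 1)   # two digits: R = b + 1
--             d = 3
--             while 2 ** (d - 1) <= R:      # d digits need a base b >= 2 with b**(d-1) <= R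
--                 b = _iroot(R, d - 1)      # the only base whose d-digit repunit can be R
--                 if k < b and (b ** d - 1) // (b - 1) == R:
--                     best = min(best, b)
--                 d += 1
--         k += 1
--     return best
-- ===== Notes on version B (the rewrite author's own statement) =====
-- stated objective: alternative
-- what changed: B never scans bases: it enumerates the repeated digit k (a trial divisor of N up to sqrt(N)), takes the cofactor R = N//k as a candidate repunit and inverts R to a base (R-1 for two digits, an integer-root bisection plus a geometric-sum check for each digit count d >= 3), min-folding all candidates seeded with the single-digit base N+1; A's special cases, per-base digit loop and descending divisor scan all disappear.
-- outside the precondition, e.g. on un(0): A returns -1, B returns 1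
import Mathlib
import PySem

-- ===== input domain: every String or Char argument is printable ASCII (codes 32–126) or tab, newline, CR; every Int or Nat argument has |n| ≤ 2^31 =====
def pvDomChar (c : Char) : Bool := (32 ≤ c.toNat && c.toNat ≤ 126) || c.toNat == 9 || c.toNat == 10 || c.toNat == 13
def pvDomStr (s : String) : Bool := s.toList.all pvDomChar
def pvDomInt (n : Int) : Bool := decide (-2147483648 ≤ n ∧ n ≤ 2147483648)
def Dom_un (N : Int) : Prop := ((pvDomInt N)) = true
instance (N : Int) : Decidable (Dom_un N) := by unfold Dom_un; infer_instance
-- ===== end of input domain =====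

-- B never scans bases: it enumerates the repeated digit k (a divisor of N with k*k <= N), takes
-- the cofactor R = N // k as candidate repunit and inverts it to a base (R - 1 for two digits,
-- an integer-root bisection per digit count d >= 3), min-folding all candidates (objective:
-- alternative; B is not faster).

-- termination helper for the division loops (cited by the ports' decreasing_by)
theorem pvFloordivToNatLt (n b : Int) (h : 0 < n) (hb : 2 ≤ b) :
    (PySem.Int.floordiv n b).toNat < n.toNat := by
  have hb0 : (0:Int) < b := by omega
  have h1 : 0 ≤ PySem.Int.floordiv n b := by
    rw [PySem.Int.floordiv_eq_ediv_of_pos hb0]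
    exact Int.ediv_nonneg (by omega) (by omega)
  have h2 : PySem.Int.floordiv n b < n := by
    refine (PySem.Int.floordiv_lt_iff_lt_mul hb0).mpr ?_
    nlinarith
  omega

-- ===== PORT A =====
-- A's inner 'while n > 0: n = n // b; if n % b != k: break' (returns the final n)
def aWhile (b k n : Int) : Int :=
  if h : 0 < n ∧ 2 ≤ b then
    if PySem.Int.mod (PySem.Int.floordiv n b) b ≠ k then PySem.Int.floordiv n b
    else aWhile b k (PySem.Int.floordiv n b)
  else n
termination_by n.toNat
decreasing_by exact pvFloordivToNatLt n b h.1 h.2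

def aPhase1 (N root b : Int) : Option Int :=
  if _h : b ≤ root then
    if b = N - 1 then some b
    else if aWhile b (PySem.Int.mod N b) N = 0 then some b
    else aPhase1 N root (b + 1)
  else none
termination_by (root + 1 - b).toNat
decreasing_by omega

def aPhase2 (N d : Int) : Int :=
  if _h : 2 ≤ d then
    if PySem.Int.mod N d = 0 ∧ d < PySem.Int.floordiv N d - 1 then PySem.Int.floordiv N d - 1
    else aPhase2 N (d - 1)
  else N - 1
termination_by d.toNat
decreasing_by omega

def un (N : Int) : Int :=
  if N = 1 then 2
  else if N = 2 then 3
  else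
    let root : Int := (Nat.sqrt N.toNat : Int)
    match aPhase1 N root 2 with
    | some b => b
    | none => aPhase2 N root

-- ===== PORT B =====
-- B's _iroot(R, e): bisection for the largest b with b**e <= R. The Nat fuel arguments here
-- and below are pure totality devices (the callers pass more fuel than the loops can consume).
def bIrootGo (R e : Int) : Nat → Int → Int → Int
  | 0, lo, _ => lo
  | fuel + 1, lo, hi =>
    if lo < hi then
      if (PySem.Int.floordiv (lo + hi + 1) 2) ^ e.toNat ≤ R then
        bIrootGo R e fuel (PySem.Int.floordiv (lo + hi + 1) 2) hi
      else
        bIrootGo R e fuel lo (PySem.Int.floordiv (lo + hi + 1) 2 - 1)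
    else lo

-- B's inner 'while 2 ** (d - 1) <= R: …; d += 1'
def bInnerD (k R : Int) : Nat → Int → Int → Int
  | 0, best, _ => best
  | fuel + 1, best, d =>
    if (2:Int) ^ (d - 1).toNat ≤ R then
      bInnerD k R fuel
        (if k < bIrootGo R (d - 1) R.toNat 1 R ∧
            PySem.Int.floordiv ((bIrootGo R (d - 1) R.toNat 1 R) ^ d.toNat - 1)
              (bIrootGo R (d - 1) R.toNat 1 R - 1) = R
         then min best (bIrootGo R (d - 1) R.toNat 1 R) else best)
        (d + 1)
    else best

-- B's outer 'while k * k <= N'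
def bOuter (N : Int) : Nat → Int → Int → Int
  | 0, best, _ => best
  | fuel + 1, best, k =>
    if k * k ≤ N then
      bOuter N fuel
        (if PySem.Int.mod N k = 0 then
          bInnerD k (PySem.Int.floordiv N k) ((PySem.Int.floordiv N k).toNat + 1)
            (if k < PySem.Int.floordiv N k - 1
             then min best (PySem.Int.floordiv N k - 1) else best)
            3
         else best)
      (k + 1)
    else best

def un_alt (N : Int) : Int := bOuter N (N.toNat + 1) (N + 1) 1

-- ===== PRECONDITION & SPEC =====
-- Pre_ excludes N ≤ 0: A raises ValueError (math.sqrt of a negative) for N < 0 and B does not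
-- return there either; at N = 0 both programs fall through their loops and return meaningless
-- leftovers, neither of which is a base, so that corner is nobody's to specify (see cites).
def Pre_un (N : Int) : Prop := 1 ≤ N
instance (N : Int) : Decidable (Pre_un N) := by unfold Pre_un; infer_instance
def pvWitness_un : Int := (7)

def Spec_un (N : Int) (out : Int) : Prop := out = un_alt N
instance (N : Int) (out : Int) : Decidable (Spec_un N out) := by unfold Spec_un; infer_instance

-- ===== CLAIM (what is proved, stated in full; the proofs are below) =====
def Claim_equal_un : Prop := ∀ (N : Int), Dom_un N → Pre_un N → Spec_un N (un N)

-- ===== LEMMAS AND PROOFS =====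
-- 'dOk b k n = 0' iff all base-b digits of n are k (the shape shared by both programs' tests)
def dOk (b k n : Int) : Int :=
  if h : 0 < n ∧ PySem.Int.mod n b = k ∧ 2 ≤ b then dOk b k (PySem.Int.floordiv n b)
  else n
termination_by n.toNat
decreasing_by exact pvFloordivToNatLt n b h.1 h.2.2

-- 'Succ N b' = all base-b digits of N are equal (the repdigit property)
def Succ (N b : Int) : Prop :=
  dOk b (PySem.Int.mod N b) (PySem.Int.floordiv N b) = 0

-- RepU b j = the j-digit repunit 1 + b + … + b^(j-1)
def RepU (b : Int) : Nat → Int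
  | 0 => 0
  | j + 1 => RepU b j * b + 1

theorem fd_nonneg (n b : Int) (hn : 0 ≤ n) (hb : 0 < b) : 0 ≤ PySem.Int.floordiv n b := by
  rw [PySem.Int.floordiv_eq_ediv_of_pos hb]; exact Int.ediv_nonneg hn (by omega)

-- A's inner loop computes the all-digits-equal residue dOk
theorem aWhile_eq_dOk (b k : Int) (hb : 2 ≤ b) :
    ∀ n : Int, 0 < n → aWhile b k n = dOk b k (PySem.Int.floordiv n b) := by
  have H : ∀ m : Nat, ∀ n : Int, n.toNat = m → 0 < n →
      aWhile b k n = dOk b k (PySem.Int.floordiv n b) := by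
    intro m
    induction m using Nat.strong_induction_on with
    | _ m IH =>
      intro n hm hn
      have hfd := fd_nonneg n b (by omega) (by omega)
      rw [aWhile, dif_pos ⟨hn, hb⟩]
      by_cases hz : PySem.Int.floordiv n b = 0
      · rw [hz]
        have hm0 : PySem.Int.mod (0:Int) b = 0 := by
          rw [PySem.Int.mod_eq_emod_of_pos (by omega)]; exact Int.zero_emod b
        rw [dOk]
        by_cases hk : PySem.Int.mod (0:Int) b ≠ k
        · rw [if_pos hk]; simp
        · rw [if_neg hk, aWhile]; simp
      · have hpos : 0 < PySem.Int.floordiv n b := by omega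
        by_cases hk : PySem.Int.mod (PySem.Int.floordiv n b) b ≠ k
        · rw [if_pos hk, dOk, dif_neg (by tauto)]
        · rw [if_neg hk]
          push_neg at hk
          rw [dOk, dif_pos ⟨hpos, hk, hb⟩]
          exact IH (PySem.Int.floordiv n b).toNat
            (by have := pvFloordivToNatLt n b hn hb; omega) _ rfl hpos
  intro n hn; exact H n.toNat n rfl hn

-- base b > N: N is a single digit
theorem Succ_of_lt (N b : Int) (h0 : 0 ≤ N) (hb : N < b) : Succ N b := by
  have hb0 : (0:Int) < b := by omega
  have hfd : PySem.Int.floordiv N b = 0 := by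
    rw [PySem.Int.floordiv_eq_ediv_of_pos hb0]; exact Int.ediv_eq_zero_of_lt h0 hb
  unfold Succ
  rw [hfd, dOk]
  simp

-- two equal digits: N = a*(b+1) with 1 ≤ a < b
theorem Succ_two_digit (a b N : Int) (h1 : 1 ≤ a) (hab : a < b) (hb : 2 ≤ b)
    (hN : N = a * (b + 1)) : Succ N b := by
  have hb0 : (0:Int) < b := by omega
  have hfd : PySem.Int.floordiv N b = a := by
    rw [PySem.Int.floordiv_eq_iff_of_pos hb0]; constructor <;> nlinarith
  have hmod : PySem.Int.mod N b = a := by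
    have := PySem.Int.floordiv_mul_add_mod N b
    rw [hfd] at this; nlinarith
  have hma : PySem.Int.mod a b = a := by
    rw [PySem.Int.mod_eq_emod_of_pos hb0]; exact Int.emod_eq_of_lt (by omega) hab
  have hfa : PySem.Int.floordiv a b = 0 := by
    rw [PySem.Int.floordiv_eq_ediv_of_pos hb0]; exact Int.ediv_eq_zero_of_lt (by omega) hab
  unfold Succ
  rw [hfd, hmod, dOk, dif_pos ⟨by omega, hma, hb⟩, hfa, dOk]
  simp

-- conversely, a successful base b with b*b > N ≥ b is a two-digit repdigit base
theorem Succ_big_inv (N b : Int) (hb : 2 ≤ b) (hbig : N < b * b) (hbN : b ≤ N)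
    (hs : Succ N b) : ∃ a, 1 ≤ a ∧ a < b ∧ N = a * (b + 1) := by
  have hb0 : (0:Int) < b := by omega
  set q := PySem.Int.floordiv N b with hq
  have hq1 : 1 ≤ q := by
    rw [hq, PySem.Int.floordiv_eq_ediv_of_pos hb0]
    exact Int.le_ediv_iff_mul_le hb0 |>.mpr (by omega)
  have hqb : q < b := by
    have := PySem.Int.floordiv_mul_add_mod N b
    have hm := PySem.Int.mod_nonneg N hb0
    nlinarith
  unfold Succ at hs
  rw [← hq, dOk] at hs
  split_ifs at hs with hg
  · obtain ⟨-, hk, -⟩ := hg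
    have hmq : PySem.Int.mod q b = q := by
      rw [PySem.Int.mod_eq_emod_of_pos hb0]; exact Int.emod_eq_of_lt (by omega) hqb
    have hNeq : N = q * (b + 1) := by
      have := PySem.Int.floordiv_mul_add_mod N b
      rw [← hq] at this
      rw [hmq] at hk
      nlinarith
    exact ⟨q, hq1, hqb, hNeq⟩
  · omega

-- phase 1 returning none means no base in [b, root] succeeds
theorem aPhase1_none_min (N root : Int) (hN : 1 ≤ N) :
    ∀ b, 2 ≤ b → aPhase1 N root b = none →
      ∀ c, b ≤ c → c ≤ root → ¬ Succ N c := by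
  have H : ∀ m : Nat, ∀ b : Int, (root + 1 - b).toNat = m → 2 ≤ b →
      aPhase1 N root b = none → ∀ c, b ≤ c → c ≤ root → ¬ Succ N c := by
    intro m
    induction m using Nat.strong_induction_on with
    | _ m IH =>
      intro b hm hb hnone c hbc hcr
      have hle : b ≤ root := by omega
      rw [aPhase1, dif_pos hle] at hnone
      split_ifs at hnone with h1 h2
      · have hw : aWhile b (PySem.Int.mod N b) N ≠ 0 := h2
        rcases eq_or_lt_of_le hbc with he | hlt
        · subst he
          intro hs
          exact hw (by rw [aWhile_eq_dOk b _ hb N (by omega)]; exact hs)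
        · exact IH (root + 1 - (b + 1)).toNat (by omega) (b + 1) rfl (by omega)
            hnone c (by omega) hcr
  intro b hb hnone; exact H (root + 1 - b).toNat b rfl hb hnone

-- phase 1 returning some c means c is the smallest successful base in [b, root]
theorem aPhase1_some_min (N root : Int) (hN : 3 ≤ N) (hroot : root * root ≤ N) :
    ∀ b, 2 ≤ b → ∀ c, aPhase1 N root b = some c →
      b ≤ c ∧ c ≤ root ∧ Succ N c ∧ ∀ d, b ≤ d → d < c → ¬ Succ N d := by
  have H : ∀ m : Nat, ∀ b : Int, (root + 1 - b).toNat = m → 2 ≤ b →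
      ∀ c, aPhase1 N root b = some c →
        b ≤ c ∧ c ≤ root ∧ Succ N c ∧ ∀ d, b ≤ d → d < c → ¬ Succ N d := by
    intro m
    induction m using Nat.strong_induction_on with
    | _ m IH =>
      intro b hm hb c hsome
      by_cases hle : b ≤ root
      · have hne : b ≠ N - 1 := by
          intro he
          have h1 : b * b ≤ root * root := mul_le_mul hle hle (by omega) (by omega)
          nlinarith
        rw [aPhase1, dif_pos hle, if_neg hne] at hsome
        split_ifs at hsome with h2
        · obtain rfl : b = c := by injection hsome
          refine ⟨le_rfl, hle, ?_, fun d h1 h2 _ => by omega⟩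
          unfold Succ
          rw [← aWhile_eq_dOk b _ hb N (by omega)]
          exact h2
        · obtain ⟨hbc, hcr, hsc, hmin⟩ := IH (root + 1 - (b + 1)).toNat (by omega)
            (b + 1) rfl (by omega) c hsome
          refine ⟨by omega, hcr, hsc, ?_⟩
          intro d hd1 hd2
          rcases eq_or_lt_of_le hd1 with he | hlt
          · intro hs
            rw [← he] at hs
            unfold Succ at hs
            rw [← aWhile_eq_dOk b _ hb N (by omega)] at hs
            exact h2 hs
          · exact hmin d (by omega) (by omega)
      · rw [aPhase1, dif_neg hle] at hsome; exact absurd hsome (by simp)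
  intro b hb; exact H (root + 1 - b).toNat b rfl hb

theorem fd_one (N : Int) : PySem.Int.floordiv N 1 = N := by
  rw [PySem.Int.floordiv_eq_ediv_of_pos (by omega)]; exact Int.ediv_one N

theorem md_one (N : Int) : PySem.Int.mod N 1 = 0 := by
  rw [PySem.Int.mod_eq_emod_of_pos (by omega)]; exact Int.emod_one N

theorem fd_antitone (N x d : Int) (hN : 0 ≤ N) (hx : 1 ≤ x) (hxd : x ≤ d) :
    PySem.Int.floordiv N d ≤ PySem.Int.floordiv N x := by
  have hx0 : (0:Int) < x := by omega
  have hd0 : (0:Int) < d := by omega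
  rw [PySem.Int.floordiv_eq_ediv_of_pos hx0, PySem.Int.floordiv_eq_ediv_of_pos hd0]
  have h1 : 0 ≤ N / d := Int.ediv_nonneg hN (by omega)
  rw [Int.le_ediv_iff_mul_le hx0]
  calc N / d * x ≤ N / d * d := by exact mul_le_mul_of_nonneg_left hxd h1
    _ ≤ N := Int.ediv_mul_le N (by omega)

-- phase 2's value is one of the divisor candidates N//a - 1 (a ∈ [1, d], a | N, a < N//a - 1)
theorem aPhase2_witness (N : Int) (hN : 3 ≤ N) :
    ∀ d : Int, 1 ≤ d → ∃ a, 1 ≤ a ∧ a ≤ d ∧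
      (PySem.Int.mod N a = 0 ∧ a < PySem.Int.floordiv N a - 1) ∧
      aPhase2 N d = PySem.Int.floordiv N a - 1 := by
  have H : ∀ m : Nat, ∀ d : Int, d.toNat = m → 1 ≤ d → ∃ a, 1 ≤ a ∧ a ≤ d ∧
      (PySem.Int.mod N a = 0 ∧ a < PySem.Int.floordiv N a - 1) ∧
      aPhase2 N d = PySem.Int.floordiv N a - 1 := by
    intro m
    induction m using Nat.strong_induction_on with
    | _ m IH =>
      intro d hm hd
      by_cases h2 : 2 ≤ d
      · rw [aPhase2, dif_pos h2]
        by_cases hc : PySem.Int.mod N d = 0 ∧ d < PySem.Int.floordiv N d - 1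
        · rw [if_pos hc]; exact ⟨d, by omega, le_refl d, hc, rfl⟩
        · rw [if_neg hc]
          obtain ⟨a, ha1, had, hav, hae⟩ := IH (d - 1).toNat (by omega) (d - 1) rfl (by omega)
          exact ⟨a, ha1, by omega, hav, hae⟩
      · have hd1 : d = 1 := by omega
        subst hd1
        rw [aPhase2, dif_neg (by omega)]
        exact ⟨1, le_refl 1, le_refl 1, ⟨md_one N, by rw [fd_one]; omega⟩, by rw [fd_one]⟩
  intro d hd; exact H d.toNat d rfl hd

-- phase 2's value is ≤ every divisor candidate in range
theorem aPhase2_le (N : Int) (hN : 3 ≤ N) :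
    ∀ d x : Int, 1 ≤ x → x ≤ d →
      (PySem.Int.mod N x = 0 ∧ x < PySem.Int.floordiv N x - 1) →
      aPhase2 N d ≤ PySem.Int.floordiv N x - 1 := by
  have H : ∀ m : Nat, ∀ d : Int, d.toNat = m → ∀ x : Int, 1 ≤ x → x ≤ d →
      (PySem.Int.mod N x = 0 ∧ x < PySem.Int.floordiv N x - 1) →
      aPhase2 N d ≤ PySem.Int.floordiv N x - 1 := by
    intro m
    induction m using Nat.strong_induction_on with
    | _ m IH =>
      intro d hm x hx hxd hv
      by_cases h2 : 2 ≤ d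
      · rw [aPhase2, dif_pos h2]
        by_cases hc : PySem.Int.mod N d = 0 ∧ d < PySem.Int.floordiv N d - 1
        · rw [if_pos hc]
          have := fd_antitone N x d (by omega) hx hxd
          omega
        · rw [if_neg hc]
          have hxd' : x ≤ d - 1 := by
            rcases eq_or_lt_of_le hxd with he | hlt
            · exact absurd (he ▸ hv) hc
            · omega
          exact IH (d - 1).toNat (by omega) (d - 1) rfl x hx hxd' hv
      · have hx1 : x = 1 := by omega
        subst hx1
        rw [aPhase2, dif_neg h2, fd_one]
  intro d x hx hxd hv; exact H d.toNat d rfl x hx hxd hv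

-- divisor a of N gives N//a = cofactor
theorem fd_of_dvd (N a c : Int) (ha : 1 ≤ a) (hN : N = a * c) :
    PySem.Int.floordiv N a = c := by
  rw [PySem.Int.floordiv_eq_ediv_of_pos (by omega), hN]
  exact Int.mul_ediv_cancel_left c (by omega)

theorem mod_of_dvd (N a c : Int) (ha : 1 ≤ a) (hN : N = a * c) :
    PySem.Int.mod N a = 0 := by
  rw [PySem.Int.mod_eq_zero_iff_dvd]; exact ⟨c, hN⟩

-- characterisation of A's result as the minimal successful base
theorem un_is_min (N : Int) (h : 1 ≤ N) :
    Succ N (un N) ∧ 2 ≤ un N ∧ un N ≤ N + 1 ∧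
      ∀ c, 2 ≤ c → c < un N → ¬ Succ N c := by
  by_cases h1 : N = 1
  · subst h1
    have hu : un 1 = 2 := rfl
    rw [hu]
    exact ⟨Succ_of_lt 1 2 (by omega) (by omega), by omega, by omega,
      fun c h1 h2 => by omega⟩
  by_cases h2 : N = 2
  · subst h2
    have hu : un 2 = 3 := rfl
    rw [hu]
    refine ⟨Succ_of_lt 2 3 (by omega) (by omega), by omega, by omega, ?_⟩
    intro c hc1 hc2
    have hc : c = 2 := by omega
    subst hc
    unfold Succ
    have hm : PySem.Int.mod (2:Int) 2 = 0 := by decide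
    have hf : PySem.Int.floordiv (2:Int) 2 = 1 := by decide
    rw [hm, hf, dOk]
    have hm1 : PySem.Int.mod (1:Int) 2 = 1 := by decide
    rw [dif_neg (by rw [hm1]; omega)]
    omega
  have hN : 3 ≤ N := by omega
  have htn : (N.toNat : Int) = N := Int.toNat_of_nonneg (by omega)
  have hr2 : ((Nat.sqrt N.toNat : Nat) : Int) * ((Nat.sqrt N.toNat : Nat) : Int) ≤ N := by
    have hsq := Nat.sqrt_le' N.toNat
    rw [pow_two] at hsq
    have hc : ((Nat.sqrt N.toNat * Nat.sqrt N.toNat : Nat) : Int) ≤ ((N.toNat : Nat) : Int) := by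
      exact_mod_cast hsq
    push_cast at hc
    omega
  have hr1 : (1:Int) ≤ ((Nat.sqrt N.toNat : Nat) : Int) := by
    have h0 : 0 < N.toNat := by omega
    have := Nat.sqrt_pos.mpr h0
    omega
  set root : Int := (Nat.sqrt N.toNat : Int) with hrootdef
  have hrN : root ≤ N := by nlinarith
  have hr3 : ∀ b : Int, root < b → N < b * b := by
    intro b hb
    have hsq := Nat.lt_succ_sqrt N.toNat
    have hc : ((N.toNat : Nat) : Int) <
        ((Nat.sqrt N.toNat + 1) * (Nat.sqrt N.toNat + 1) : Nat) := by exact_mod_cast hsq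
    push_cast at hc
    rw [← hrootdef] at hc
    have hb1 : root + 1 ≤ b := by omega
    have hmul : (root + 1) * (root + 1) ≤ b * b := mul_le_mul hb1 hb1 (by omega) (by omega)
    linarith
  have hun : un N = match aPhase1 N root 2 with
      | some b => b
      | none => aPhase2 N root := by
    rw [un, if_neg h1, if_neg h2]
  cases hB : aPhase1 N root 2 with
  | some c =>
    have hunc : un N = c := by rw [hun, hB]
    rw [hunc]
    obtain ⟨hbc, hcr, hsc, hmin⟩ := aPhase1_some_min N root hN hr2 2 (by omega) c hB
    exact ⟨hsc, by omega, by omega, hmin⟩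
  | none =>
    have hunc : un N = aPhase2 N root := by rw [hun, hB]
    rw [hunc]
    set r := aPhase2 N root with hrdef
    obtain ⟨a, ha1, har, ⟨hamod, halt⟩, hae⟩ := aPhase2_witness N hN root hr1
    have haN : N = a * (PySem.Int.floordiv N a) := by
      have := PySem.Int.floordiv_mul_add_mod N a
      rw [hamod] at this
      nlinarith
    have hNr : N = a * (r + 1) := by
      rw [hrdef, hae]
      have he : PySem.Int.floordiv N a - 1 + 1 = PySem.Int.floordiv N a := by ring
      rw [he]
      exact haN
    have hra : a < r := by rw [hrdef, hae]; omega
    have hr2' : 2 ≤ r := by omega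
    have hrle : r ≤ N - 1 := by
      have := aPhase2_le N hN root 1 (le_refl 1) hr1 ⟨md_one N, by rw [fd_one]; omega⟩
      rw [fd_one] at this
      rw [hrdef]
      omega
    refine ⟨Succ_two_digit a r N ha1 hra hr2' hNr, hr2', by omega, ?_⟩
    intro c hc1 hc2 hsc
    by_cases hcr : c ≤ root
    · exact aPhase1_none_min N root (by omega) 2 (by omega) hB c hc1 hcr hsc
    · push_neg at hcr
      obtain ⟨a', ha'1, ha'c, hNc⟩ :=
        Succ_big_inv N c hc1 (hr3 c hcr) (by omega) hsc
      have ha'root : a' ≤ root := by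
        by_contra hgt
        push_neg at hgt
        have := hr3 a' hgt
        nlinarith
      have hfdc : PySem.Int.floordiv N a' = c + 1 := fd_of_dvd N a' (c + 1) ha'1 hNc
      have := aPhase2_le N hN root a' ha'1 ha'root
        ⟨mod_of_dvd N a' (c + 1) ha'1 hNc, by rw [hfdc]; omega⟩
      rw [hfdc] at this
      rw [hrdef] at hc2
      omega


-- floordiv / mod of an explicit decomposition q*b + r, 0 ≤ r < b
theorem fdmd_decomp (q r b : Int) (hb : 0 < b) (hr0 : 0 ≤ r) (hrb : r < b) :
    PySem.Int.floordiv (q * b + r) b = q ∧ PySem.Int.mod (q * b + r) b = r := by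
  have hfd : PySem.Int.floordiv (q * b + r) b = q := by
    rw [PySem.Int.floordiv_eq_iff_of_pos hb]
    constructor <;> nlinarith
  have hmd := PySem.Int.floordiv_mul_add_mod (q * b + r) b
  rw [hfd] at hmd
  exact ⟨hfd, by linarith⟩

theorem eq_mul_fd (N x : Int) (hx : 1 ≤ x) (hmod : PySem.Int.mod N x = 0) :
    N = x * PySem.Int.floordiv N x := by
  have h := PySem.Int.floordiv_mul_add_mod N x
  rw [hmod] at h
  linear_combination -h

theorem Rep_succ (b : Int) (j : Nat) : RepU b (j + 1) = RepU b j * b + 1 := rfl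

theorem Rep_pos (b : Int) (hb : 0 ≤ b) : ∀ j : Nat, 0 ≤ RepU b j := by
  intro j
  induction j with
  | zero => simp [RepU]
  | succ j IH => rw [Rep_succ]; nlinarith

theorem Rep_two (b : Int) : RepU b 2 = b + 1 := by simp [RepU]

theorem Rep_one_le (b : Int) (hb : 0 ≤ b) (j : Nat) : 1 ≤ RepU b (j + 1) := by
  rw [Rep_succ]; nlinarith [Rep_pos b hb j]

theorem Rep_ge_succ (b : Int) (hb : 0 ≤ b) (j : Nat) : b + 1 ≤ RepU b (j + 2) := by
  rw [Rep_succ]; nlinarith [Rep_one_le b hb j]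

theorem Rep_lb (b : Int) (hb : 1 ≤ b) : ∀ j : Nat, b ^ j ≤ RepU b (j + 1) := by
  intro j
  induction j with
  | zero => simp [RepU]
  | succ j IH =>
    have h1 : b ^ j * b ≤ RepU b (j + 1) * b := mul_le_mul_of_nonneg_right IH (by omega)
    have h2 : b ^ (j + 1) = b ^ j * b := by ring
    rw [Rep_succ]
    linarith

theorem Rep_ub (b : Int) (hb : 2 ≤ b) : ∀ j : Nat, RepU b (j + 2) ≤ (b + 1) ^ (j + 1) := by
  intro j
  induction j with
  | zero => rw [Rep_two]; simp
  | succ j IH =>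
    have h1 : RepU b (j + 2) * b ≤ (b + 1) ^ (j + 1) * b := mul_le_mul_of_nonneg_right IH (by omega)
    have h2 : (1:Int) ≤ (b + 1) ^ (j + 1) := one_le_pow₀ (by omega)
    have hA : RepU b (j + 1 + 2) = RepU b (j + 2) * b + 1 := rfl
    have hB : ((b + 1):Int) ^ (j + 1 + 1) = (b + 1) ^ (j + 1) * (b + 1) := by ring
    rw [hA, hB]
    nlinarith

theorem Rep_ub_strict (b : Int) (hb : 2 ≤ b) : ∀ j : Nat, RepU b (j + 3) < (b + 1) ^ (j + 2) := by
  intro j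
  have IH := Rep_ub b hb j
  have h1 : RepU b (j + 2) * b ≤ (b + 1) ^ (j + 1) * b := mul_le_mul_of_nonneg_right IH (by omega)
  have h2 : (b + 1 : Int) ≤ (b + 1) ^ (j + 1) := by
    calc (b + 1 : Int) = (b + 1) ^ 1 := (pow_one _).symm
      _ ≤ (b + 1) ^ (j + 1) := pow_le_pow_right₀ (by omega) (by omega)
  have h3 : (b + 1) ^ (j + 2) = (b + 1) ^ (j + 1) * b + (b + 1) ^ (j + 1) := by ring
  rw [Rep_succ]
  linarith

theorem Rep_geom (b : Int) : ∀ j : Nat, (b - 1) * RepU b j = b ^ j - 1 := by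
  intro j
  induction j with
  | zero => simp [RepU]
  | succ j IH =>
    rw [Rep_succ]
    have h : (b - 1) * (RepU b j * b + 1) = ((b - 1) * RepU b j) * b + (b - 1) := by ring
    rw [h, IH]
    ring

theorem fd_geom (b : Int) (hb : 2 ≤ b) (j : Nat) :
    PySem.Int.floordiv (b ^ j - 1) (b - 1) = RepU b j :=
  fd_of_dvd (b ^ j - 1) (b - 1) (RepU b j) (by omega) (by linarith [Rep_geom b j])

-- k repeated j times is a repdigit: dOk accepts k * RepU b j
theorem dOk_rep (b k : Int) (hb : 2 ≤ b) (hk1 : 1 ≤ k) (hkb : k < b) :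
    ∀ j : Nat, dOk b k (k * RepU b j) = 0 := by
  intro j
  induction j with
  | zero =>
    rw [show k * RepU b 0 = 0 from by simp [RepU]]
    rw [dOk]
    simp
  | succ j IH =>
    have hdc := fdmd_decomp (k * RepU b j) k b (by omega) (by omega) hkb
    have hp : 0 < (k * RepU b j) * b + k := by
      have h0 : 0 ≤ k * RepU b j := mul_nonneg (by omega) (Rep_pos b (by omega) j)
      have h0b : 0 ≤ (k * RepU b j) * b := mul_nonneg h0 (by omega)
      linarith
    have hEq : k * RepU b (j + 1) = (k * RepU b j) * b + k := by rw [Rep_succ]; ring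
    rw [hEq, dOk, dif_pos ⟨hp, hdc.2, hb⟩, hdc.1]
    exact IH

theorem Succ_of_rep (N b k : Int) (j : Nat) (hb : 2 ≤ b) (hk1 : 1 ≤ k) (hkb : k < b)
    (hN : N = k * RepU b (j + 1)) : Succ N b := by
  have hdc := fdmd_decomp (k * RepU b j) k b (by omega) (by omega) hkb
  have hNe : N = (k * RepU b j) * b + k := by rw [hN, Rep_succ]; ring
  unfold Succ
  rw [hNe, hdc.1, hdc.2]
  exact dOk_rep b k hb hk1 hkb j

-- and conversely: a number dOk accepts is k times a repunit
theorem dOk_zero_inv (b k : Int) (hb : 2 ≤ b) :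
    ∀ m : Int, 0 ≤ m → dOk b k m = 0 → ∃ j : Nat, m = k * RepU b j := by
  have H : ∀ t : Nat, ∀ m : Int, m.toNat = t → 0 ≤ m → dOk b k m = 0 →
      ∃ j : Nat, m = k * RepU b j := by
    intro t
    induction t using Nat.strong_induction_on with
    | _ t IH =>
      intro m hm h0 hz
      rw [dOk] at hz
      split_ifs at hz with hg
      · obtain ⟨hpos, hmod, -⟩ := hg
        have hfd0 : 0 ≤ PySem.Int.floordiv m b := fd_nonneg m b h0 (by omega)
        obtain ⟨j, hj⟩ := IH (PySem.Int.floordiv m b).toNat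
          (by have := pvFloordivToNatLt m b hpos hb; omega) _ rfl hfd0 hz
        refine ⟨j + 1, ?_⟩
        have hfm := PySem.Int.floordiv_mul_add_mod m b
        rw [hj, hmod] at hfm
        rw [Rep_succ]
        linear_combination -hfm
      · exact ⟨0, by simp [RepU]; omega⟩
  intro m hm hz
  exact H m.toNat m rfl hm hz

theorem Succ_decomp (N b : Int) (hN : 1 ≤ N) (hb : 2 ≤ b) (hs : Succ N b) :
    ∃ (k : Int) (j : Nat), 1 ≤ k ∧ k < b ∧ N = k * RepU b (j + 1) := by
  unfold Succ at hs
  have hk0 : 0 ≤ PySem.Int.mod N b := PySem.Int.mod_nonneg N (by omega)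
  have hkb : PySem.Int.mod N b < b := PySem.Int.mod_lt N (by omega)
  have hfd0 : 0 ≤ PySem.Int.floordiv N b := fd_nonneg N b (by omega) (by omega)
  obtain ⟨j, hj⟩ := dOk_zero_inv b (PySem.Int.mod N b) hb _ hfd0 hs
  have hfm := PySem.Int.floordiv_mul_add_mod N b
  rw [hj] at hfm
  have hNe : N = PySem.Int.mod N b * RepU b (j + 1) := by
    rw [Rep_succ]
    linear_combination -hfm
  have hk1 : 1 ≤ PySem.Int.mod N b := by
    rcases eq_or_lt_of_le hk0 with he | hlt
    · rw [← he] at hNe; simp at hNe; omega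
    · omega
  exact ⟨_, j, hk1, hkb, hNe⟩

-- the bisection returns the integer e-th root
theorem bIrootGo_spec (R e : Int) :
    ∀ (fuel : Nat) (lo hi : Int), 1 ≤ lo → lo ≤ hi → hi - lo < (fuel : Int) →
      lo ^ e.toNat ≤ R → R < (hi + 1) ^ e.toNat →
      1 ≤ bIrootGo R e fuel lo hi ∧ (bIrootGo R e fuel lo hi) ^ e.toNat ≤ R ∧
        R < (bIrootGo R e fuel lo hi + 1) ^ e.toNat := by
  intro fuel
  induction fuel with
  | zero => intro lo hi h1 h2 hf h3 h4; simp at hf; omega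
  | succ f IH =>
    intro lo hi h1 h2 hf h3 h4
    by_cases hlh : lo < hi
    · have hm : lo + 1 ≤ PySem.Int.floordiv (lo + hi + 1) 2 ∧
          PySem.Int.floordiv (lo + hi + 1) 2 ≤ hi := by
        have hmb := PySem.Int.floordiv_two_mid_bounds (show (lo + 1 : Int) ≤ hi from by omega)
        have he : lo + 1 + hi = lo + hi + 1 := by ring
        rw [he] at hmb
        exact hmb
      rw [bIrootGo, if_pos hlh]
      by_cases hc : (PySem.Int.floordiv (lo + hi + 1) 2) ^ e.toNat ≤ R
      · rw [if_pos hc]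
        exact IH _ hi (by omega) (by omega) (by push_cast at hf ⊢; omega) hc h4
      · rw [if_neg hc]
        push_neg at hc
        refine IH lo _ h1 (by omega) (by push_cast at hf ⊢; omega) h3 ?_
        rw [show PySem.Int.floordiv (lo + hi + 1) 2 - 1 + 1 =
          PySem.Int.floordiv (lo + hi + 1) 2 from by ring]
        exact hc
    · have hle : lo = hi := by omega
      rw [bIrootGo, if_neg hlh]
      exact ⟨h1, h3, by rw [hle]; exact h4⟩

theorem iroot_eq (R e b : Int) (hR : 1 ≤ R) (hb : 1 ≤ b) (he : 1 ≤ e)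
    (h1 : b ^ e.toNat ≤ R) (h2 : R < (b + 1) ^ e.toNat) : bIrootGo R e R.toNat 1 R = b := by
  have hRe : R < (R + 1) ^ e.toNat := by
    have hh : R + 1 ≤ (R + 1) ^ e.toNat := by
      calc R + 1 = (R + 1) ^ 1 := (pow_one _).symm
        _ ≤ (R + 1) ^ e.toNat := pow_le_pow_right₀ (by omega) (by omega)
    omega
  obtain ⟨hx1, hx2, hx3⟩ := bIrootGo_spec R e R.toNat 1 R (le_refl 1) hR
    (by omega) (by simpa using hR) hRe
  by_contra hne
  rcases lt_or_gt_of_ne hne with hlt | hgt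
  · have : (bIrootGo R e R.toNat 1 R + 1) ^ e.toNat ≤ b ^ e.toNat :=
      pow_le_pow_left₀ (by omega) (by omega) _
    omega
  · have : (b + 1) ^ e.toNat ≤ (bIrootGo R e R.toNat 1 R) ^ e.toNat :=
      pow_le_pow_left₀ (by omega) (by omega) _
    omega

-- the d-loop: a min-fold over the digit-count candidates
theorem bInnerD_spec (k R : Int) :
    ∀ (fuel : Nat) (d best : Int), 3 ≤ d →
      bInnerD k R fuel best d ≤ best ∧
      (∀ e : Int, d ≤ e → e - d < (fuel : Int) → (2:Int) ^ ((e - 1).toNat) ≤ R →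
        k < bIrootGo R (e - 1) R.toNat 1 R →
        PySem.Int.floordiv ((bIrootGo R (e - 1) R.toNat 1 R) ^ e.toNat - 1)
          (bIrootGo R (e - 1) R.toNat 1 R - 1) = R →
        bInnerD k R fuel best d ≤ bIrootGo R (e - 1) R.toNat 1 R) ∧
      (bInnerD k R fuel best d = best ∨ ∃ e : Int, d ≤ e ∧ (2:Int) ^ ((e - 1).toNat) ≤ R ∧
        k < bIrootGo R (e - 1) R.toNat 1 R ∧
        PySem.Int.floordiv ((bIrootGo R (e - 1) R.toNat 1 R) ^ e.toNat - 1)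
          (bIrootGo R (e - 1) R.toNat 1 R - 1) = R ∧
        bInnerD k R fuel best d = bIrootGo R (e - 1) R.toNat 1 R) := by
  intro fuel
  induction fuel with
  | zero =>
    intro d best hd3
    refine ⟨le_rfl, ?_, Or.inl rfl⟩
    intro e hde hef hge hk hfd
    simp at hef
    omega
  | succ f IH =>
    intro d best hd3
    by_cases hg : (2:Int) ^ ((d - 1).toNat) ≤ R
    · rw [bInnerD, if_pos hg]
      set best' := (if k < bIrootGo R (d - 1) R.toNat 1 R ∧
          PySem.Int.floordiv ((bIrootGo R (d - 1) R.toNat 1 R) ^ d.toNat - 1)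
            (bIrootGo R (d - 1) R.toNat 1 R - 1) = R
        then min best (bIrootGo R (d - 1) R.toNat 1 R) else best) with hbest'
      obtain ⟨ih1, ih2, ih3⟩ := IH (d + 1) best' (by omega)
      have hb'le : best' ≤ best := by
        rw [hbest']
        split_ifs with hcnd
        · exact min_le_left _ _
        · exact le_rfl
      refine ⟨le_trans ih1 hb'le, ?_, ?_⟩
      · intro e hde hef hge hk hfd
        rcases eq_or_lt_of_le hde with heq | hlt
        · have hb2 : best' ≤ bIrootGo R (e - 1) R.toNat 1 R := by
            rw [hbest', ← heq]
            rw [if_pos ⟨by rw [heq]; exact hk, by rw [heq]; exact hfd⟩]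
            exact min_le_right _ _
          exact le_trans ih1 hb2
        · exact ih2 e (by omega) (by push_cast at hef ⊢; omega) hge hk hfd
      · rcases ih3 with heq | ⟨e, hde, hge, hk, hfd, heq⟩
        · by_cases hcnd : k < bIrootGo R (d - 1) R.toNat 1 R ∧
              PySem.Int.floordiv ((bIrootGo R (d - 1) R.toNat 1 R) ^ d.toNat - 1)
                (bIrootGo R (d - 1) R.toNat 1 R - 1) = R
          · rcases min_choice best (bIrootGo R (d - 1) R.toNat 1 R) with hmin | hmin
            · left
              rw [heq, hbest', if_pos hcnd]
              exact hmin
            · right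
              refine ⟨d, le_rfl, hg, hcnd.1, hcnd.2, ?_⟩
              rw [heq, hbest', if_pos hcnd]
              exact hmin
          · left
            rw [heq, hbest', if_neg hcnd]
        · right
          exact ⟨e, by omega, hge, hk, hfd, heq⟩
    · rw [bInnerD, if_neg hg]
      refine ⟨le_rfl, ?_, Or.inl rfl⟩
      intro e hde hef hge hk hfd
      have hmono : (2:Int) ^ ((d - 1).toNat) ≤ (2:Int) ^ ((e - 1).toNat) :=
        pow_le_pow_right₀ (by omega) (by omega)
      omega

-- enough fuel: the d-loop's guard forces e ≤ R
theorem guard_fuel (e R : Int) (he3 : 3 ≤ e) (hge : (2:Int) ^ ((e - 1).toNat) ≤ R) :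
    e ≤ R := by
  have h1 : ((e - 1).toNat : Int) < (2:Int) ^ ((e - 1).toNat) := by
    have hn := Nat.lt_two_pow_self (n := (e - 1).toNat)
    exact_mod_cast hn
  omega

-- the k-loop: a min-fold over the divisor candidates
theorem bOuter_spec (N : Int) :
    ∀ (fuel : Nat) (k best : Int), 1 ≤ k →
      bOuter N fuel best k ≤ best ∧
      (∀ x : Int, k ≤ x → x - k < (fuel : Int) → x * x ≤ N → PySem.Int.mod N x = 0 →
        (x < PySem.Int.floordiv N x - 1 →
          bOuter N fuel best k ≤ PySem.Int.floordiv N x - 1) ∧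
        (∀ e : Int, 3 ≤ e → (2:Int) ^ ((e - 1).toNat) ≤ PySem.Int.floordiv N x →
          x < bIrootGo (PySem.Int.floordiv N x) (e - 1) (PySem.Int.floordiv N x).toNat 1
            (PySem.Int.floordiv N x) →
          PySem.Int.floordiv
            ((bIrootGo (PySem.Int.floordiv N x) (e - 1) (PySem.Int.floordiv N x).toNat 1
              (PySem.Int.floordiv N x)) ^ e.toNat - 1)
            (bIrootGo (PySem.Int.floordiv N x) (e - 1) (PySem.Int.floordiv N x).toNat 1
              (PySem.Int.floordiv N x) - 1) = PySem.Int.floordiv N x →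
          bOuter N fuel best k ≤
            bIrootGo (PySem.Int.floordiv N x) (e - 1) (PySem.Int.floordiv N x).toNat 1
              (PySem.Int.floordiv N x))) ∧
      (bOuter N fuel best k = best ∨ ∃ x : Int, k ≤ x ∧ x * x ≤ N ∧ PySem.Int.mod N x = 0 ∧
        ((x < PySem.Int.floordiv N x - 1 ∧
            bOuter N fuel best k = PySem.Int.floordiv N x - 1) ∨
         (∃ e : Int, 3 ≤ e ∧ (2:Int) ^ ((e - 1).toNat) ≤ PySem.Int.floordiv N x ∧
          x < bIrootGo (PySem.Int.floordiv N x) (e - 1) (PySem.Int.floordiv N x).toNat 1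
            (PySem.Int.floordiv N x) ∧
          PySem.Int.floordiv
            ((bIrootGo (PySem.Int.floordiv N x) (e - 1) (PySem.Int.floordiv N x).toNat 1
              (PySem.Int.floordiv N x)) ^ e.toNat - 1)
            (bIrootGo (PySem.Int.floordiv N x) (e - 1) (PySem.Int.floordiv N x).toNat 1
              (PySem.Int.floordiv N x) - 1) = PySem.Int.floordiv N x ∧
          bOuter N fuel best k =
            bIrootGo (PySem.Int.floordiv N x) (e - 1) (PySem.Int.floordiv N x).toNat 1
              (PySem.Int.floordiv N x)))) := by
  intro fuel
  induction fuel with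
  | zero =>
    intro k best hk1
    refine ⟨le_rfl, ?_, Or.inl rfl⟩
    intro x hkx hxf
    simp at hxf
    omega
  | succ f IH =>
    intro k best hk1
    by_cases hgk : k * k ≤ N
    · rw [bOuter, if_pos hgk]
      set best' := (if PySem.Int.mod N k = 0 then
          bInnerD k (PySem.Int.floordiv N k) ((PySem.Int.floordiv N k).toNat + 1)
            (if k < PySem.Int.floordiv N k - 1
             then min best (PySem.Int.floordiv N k - 1) else best)
            3
        else best) with hbest'
      obtain ⟨ih1, ih2, ih3⟩ := IH (k + 1) best' (by omega)
      have hb'le : best' ≤ best := by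
        rw [hbest']
        split_ifs with hm hc
        · exact le_trans (bInnerD_spec k (PySem.Int.floordiv N k)
            ((PySem.Int.floordiv N k).toNat + 1) 3
            (min best (PySem.Int.floordiv N k - 1)) (by omega)).1 (min_le_left _ _)
        · exact (bInnerD_spec k (PySem.Int.floordiv N k)
            ((PySem.Int.floordiv N k).toNat + 1) 3 best (by omega)).1
        · exact le_rfl
      refine ⟨le_trans ih1 hb'le, ?_, ?_⟩
      · intro x hkx hxf hxx hxm
        rcases eq_or_lt_of_le hkx with heq | hlt
        · rw [heq] at hbest'
          constructor
          · intro hcnd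
            have hb2 : best' ≤ PySem.Int.floordiv N x - 1 := by
              rw [hbest', if_pos hxm, if_pos hcnd]
              exact le_trans (bInnerD_spec x (PySem.Int.floordiv N x)
                ((PySem.Int.floordiv N x).toNat + 1) 3
                (min best (PySem.Int.floordiv N x - 1)) (by omega)).1 (min_le_right _ _)
            exact le_trans ih1 hb2
          · intro e he3 hge hkb hfd
            have hfuel : e - 3 < ((PySem.Int.floordiv N x).toNat + 1 : Int) := by
              have hR1 : (1:Int) ≤ PySem.Int.floordiv N x := by
                have := one_le_pow₀ (a := (2:Int)) (n := (e - 1).toNat) (by omega)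
                omega
              have := guard_fuel e (PySem.Int.floordiv N x) he3 hge
              omega
            have hb2 : best' ≤ bIrootGo (PySem.Int.floordiv N x) (e - 1)
                (PySem.Int.floordiv N x).toNat 1 (PySem.Int.floordiv N x) := by
              rw [hbest', if_pos hxm]
              split_ifs with hcnd
              · exact (bInnerD_spec x (PySem.Int.floordiv N x)
                  ((PySem.Int.floordiv N x).toNat + 1) 3
                  (min best (PySem.Int.floordiv N x - 1)) (by omega)).2.1
                  e he3 (by push_cast at hfuel ⊢; omega) hge hkb hfd
              · exact (bInnerD_spec x (PySem.Int.floordiv N x)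
                  ((PySem.Int.floordiv N x).toNat + 1) 3 best (by omega)).2.1
                  e he3 (by push_cast at hfuel ⊢; omega) hge hkb hfd
            exact le_trans ih1 hb2
        · obtain ⟨hA, hB⟩ := ih2 x (by omega) (by push_cast at hxf ⊢; omega) hxx hxm
          exact ⟨hA, hB⟩
      · rcases ih3 with heq | ⟨x, hkx, hxx, hxm, hrest⟩
        · rw [heq]
          by_cases hm : PySem.Int.mod N k = 0
          · set base := (if k < PySem.Int.floordiv N k - 1
              then min best (PySem.Int.floordiv N k - 1) else best) with hbase
            have hspec := bInnerD_spec k (PySem.Int.floordiv N k)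
              ((PySem.Int.floordiv N k).toNat + 1) 3 base (by omega)
            rcases hspec.2.2 with hin | ⟨e, he3, hge, hkb, hfd, hine⟩
            · by_cases hc : k < PySem.Int.floordiv N k - 1
              · rcases min_choice best (PySem.Int.floordiv N k - 1) with hmin | hmin
                · left
                  rw [hbest', if_pos hm, hin, hbase, if_pos hc]
                  exact hmin
                · right
                  refine ⟨k, le_rfl, hgk, hm, Or.inl ⟨hc, ?_⟩⟩
                  rw [hbest', if_pos hm, hin, hbase, if_pos hc]
                  exact hmin
              · left
                rw [hbest', if_pos hm, hin, hbase, if_neg hc]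
            · right
              refine ⟨k, le_rfl, hgk, hm, Or.inr ⟨e, he3, hge, hkb, hfd, ?_⟩⟩
              rw [hbest', if_pos hm]
              exact hine
          · left
            rw [hbest', if_neg hm]
        · right
          exact ⟨x, by omega, hxx, hxm, hrest⟩
    · rw [bOuter, if_neg hgk]
      refine ⟨le_rfl, ?_, Or.inl rfl⟩
      intro x hkx hxf hxx hxm
      exfalso
      nlinarith

-- soundness of the two candidate families
theorem cand2_sound (N x : Int) (hN : 1 ≤ N) (hx : 1 ≤ x) (hmod : PySem.Int.mod N x = 0)
    (hlt : x < PySem.Int.floordiv N x - 1) :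
    Succ N (PySem.Int.floordiv N x - 1) ∧ 2 ≤ PySem.Int.floordiv N x - 1 := by
  have hNe := eq_mul_fd N x hx hmod
  have hb2 : 2 ≤ PySem.Int.floordiv N x - 1 := by omega
  refine ⟨?_, hb2⟩
  refine Succ_of_rep N (PySem.Int.floordiv N x - 1) x 1 hb2 hx hlt ?_
  rw [Rep_two]
  rw [show PySem.Int.floordiv N x - 1 + 1 = PySem.Int.floordiv N x from by ring]
  exact hNe

theorem cand3_sound (N x e b0 : Int) (hN : 1 ≤ N) (hx : 1 ≤ x)
    (hmod : PySem.Int.mod N x = 0) (he3 : 3 ≤ e)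
    (hkb : x < b0)
    (hfd : PySem.Int.floordiv (b0 ^ e.toNat - 1) (b0 - 1) = PySem.Int.floordiv N x) :
    Succ N b0 ∧ 2 ≤ b0 := by
  have hb2 : 2 ≤ b0 := by omega
  have hNe := eq_mul_fd N x hx hmod
  have hRe : RepU b0 e.toNat = PySem.Int.floordiv N x := by
    rw [← fd_geom b0 hb2 e.toNat]
    exact hfd
  have hj : e.toNat = (e.toNat - 1) + 1 := by omega
  refine ⟨Succ_of_rep N b0 x (e.toNat - 1) hb2 hx hkb ?_, hb2⟩
  rw [← hj, hRe]
  exact hNe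

-- completeness: every repdigit base 2 ≤ b ≤ N is covered by a candidate
theorem bOuter_full (N : Int) (hN : 1 ≤ N) :
    bOuter N (N.toNat + 1) (N + 1) 1 ≤ N + 1 ∧
    (∀ b : Int, Succ N b → 2 ≤ b → b ≤ N → bOuter N (N.toNat + 1) (N + 1) 1 ≤ b) ∧
    (Succ N (bOuter N (N.toNat + 1) (N + 1) 1) ∧ 2 ≤ bOuter N (N.toNat + 1) (N + 1) 1) := by
  obtain ⟨h1, h2, h3⟩ := bOuter_spec N (N.toNat + 1) 1 (N + 1) (le_refl 1)
  refine ⟨h1, ?_, ?_⟩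
  · intro b hs hb2 hbN
    obtain ⟨k0, j, hk1, hkb, hNe⟩ := Succ_decomp N b hN hb2 hs
    cases j with
    | zero =>
      rw [show RepU b 1 = 1 from by simp [RepU], mul_one] at hNe
      omega
    | succ j =>
      have hR1 : b + 1 ≤ RepU b (j + 2) := Rep_ge_succ b (by omega) j
      have hmod : PySem.Int.mod N k0 = 0 := mod_of_dvd N k0 (RepU b (j + 2)) hk1 hNe
      have hfdk : PySem.Int.floordiv N k0 = RepU b (j + 2) := fd_of_dvd N k0 _ hk1 hNe
      have hkk : k0 * k0 ≤ N := by
        have hmm : k0 * (b + 1) ≤ k0 * RepU b (j + 2) :=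
          mul_le_mul_of_nonneg_left hR1 (by omega)
        nlinarith
      have hkf : k0 - 1 < ((N.toNat + 1 : Nat) : Int) := by
        have : k0 ≤ N := by nlinarith
        push_cast
        omega
      obtain ⟨hc2, hc3⟩ := h2 k0 hk1 hkf hkk hmod
      cases j with
      | zero =>
        have hfb : PySem.Int.floordiv N k0 - 1 = b := by rw [hfdk, Rep_two]; ring
        have := hc2 (by omega)
        omega
      | succ i =>
        have hR3 : 1 ≤ RepU b (i + 3) := Rep_one_le b (by omega) (i + 2)
        have het : ((i : Int) + 3).toNat = i + 3 := by omega
        have het1 : ((i : Int) + 3 - 1).toNat = i + 2 := by omega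
        have hge : (2:Int) ^ (((i : Int) + 3 - 1).toNat) ≤ PySem.Int.floordiv N k0 := by
          rw [het1, hfdk]
          calc (2:Int) ^ (i + 2) ≤ b ^ (i + 2) := pow_le_pow_left₀ (by omega) (by omega) _
            _ ≤ RepU b (i + 3) := Rep_lb b (by omega) (i + 2)
        have hirt : bIrootGo (PySem.Int.floordiv N k0) ((i : Int) + 3 - 1)
            (PySem.Int.floordiv N k0).toNat 1 (PySem.Int.floordiv N k0) = b := by
          refine iroot_eq (PySem.Int.floordiv N k0) ((i : Int) + 3 - 1) b
            (by omega) (by omega) (by omega) ?_ ?_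
          · rw [het1, hfdk]
            exact Rep_lb b (by omega) (i + 2)
          · rw [het1, hfdk]
            exact Rep_ub_strict b hb2 i
        have hfdchk : PySem.Int.floordiv
            ((bIrootGo (PySem.Int.floordiv N k0) ((i : Int) + 3 - 1)
              (PySem.Int.floordiv N k0).toNat 1
              (PySem.Int.floordiv N k0)) ^ ((i : Int) + 3).toNat - 1)
            (bIrootGo (PySem.Int.floordiv N k0) ((i : Int) + 3 - 1)
              (PySem.Int.floordiv N k0).toNat 1
              (PySem.Int.floordiv N k0) - 1) = PySem.Int.floordiv N k0 := by
          rw [hirt, het, fd_geom b hb2 (i + 3), hfdk]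
        have := hc3 ((i : Int) + 3) (by omega) hge (by rw [hirt]; exact hkb) hfdchk
        rw [hirt] at this
        exact this
  · rcases h3 with heq | ⟨x, hkx, hxx, hxm, hrest⟩
    · rw [heq]
      exact ⟨Succ_of_lt N (N + 1) (by omega) (by omega), by omega⟩
    · rcases hrest with ⟨hc, heq⟩ | ⟨e, he3, hge, hkb, hfd, heq⟩
      · rw [heq]
        exact cand2_sound N x hN hkx hxm hc
      · rw [heq]
        exact cand3_sound N x e _ hN hkx hxm he3 hkb hfd

theorem main_eq (N : Int) (h : 1 ≤ N) : un N = un_alt N := by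
  obtain ⟨hs, h2, hub, hmin⟩ := un_is_min N h
  obtain ⟨hle, hcomp, hsound⟩ := bOuter_full N h
  have hres2 : Succ N (bOuter N (N.toNat + 1) (N + 1) 1) ∧
      2 ≤ bOuter N (N.toNat + 1) (N + 1) 1 := hsound
  have hba : bOuter N (N.toNat + 1) (N + 1) 1 ≤ un N := by
    rcases eq_or_lt_of_le hub with he | hlt
    · rw [he]; exact hle
    · exact hcomp (un N) hs h2 (by omega)
  have hab : un N ≤ bOuter N (N.toNat + 1) (N + 1) 1 := by
    by_contra hcon
    push_neg at hcon
    exact hmin (bOuter N (N.toNat + 1) (N + 1) 1) hres2.2 hcon hres2.1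
  show un N = bOuter N (N.toNat + 1) (N + 1) 1
  omega

-- ===== VERDICT (by name: the statement is the Claim_ definition above) =====
theorem un_spec : Claim_equal_un := by
  intro N _ hpre
  exact main_eq N hpre
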